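-- pv_equiv track=rewrite | github.com/caiok/hacker_rank | medium/OrganizingContainersOfBalls.py | organizingContainers_official
-- ===== SOURCE A (Python) =====
-- def organizingContainers_official(containers):
-- 	# Input:
-- 	#   containers[container][type] = how_many
--
-- 	containers_count = [sum(c) for c in containers]
-- 	types_count = []
-- 	for i in range(len(containers)):
-- 		c = 0
-- 		for j in range(len(containers)):
-- 			c += containers[j][i]
-- 		types_count.append(c)
--
-- 	containers_count.sort()
-- 	types_count.sort()
--
-- 	if containers_count == types_count:
-- 		return "Possible"
-- 	else:
-- 		return "Impossible"
-- ===== SOURCE B (Python) =====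
-- def organizingContainers_official(containers):
--     n = len(containers)
--     col = [0] * n
--     for row in containers:
--         for i in range(n):
--             col[i] += row[i]
--     tally = {}
--     for row in containers:
--         s = sum(row)
--         tally[s] = tally.get(s, 0) + 1
--     for c in col:
--         tally[c] = tally.get(c, 0) - 1
--     return "Possible" if all(v == 0 for v in tally.values()) else "Impossible"
-- ===== Notes on version B (the rewrite author's own statement) =====
-- stated objective: alternative
-- what changed: B makes one row-major pass accumulating all column sums into a vector (A extracts each column with a nested column-major scan), then decides multiset equality with a signed dict tally (+1 per row sum, -1 per column sum, check all zero) instead of A's two sorts and list comparison.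
import Mathlib
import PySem

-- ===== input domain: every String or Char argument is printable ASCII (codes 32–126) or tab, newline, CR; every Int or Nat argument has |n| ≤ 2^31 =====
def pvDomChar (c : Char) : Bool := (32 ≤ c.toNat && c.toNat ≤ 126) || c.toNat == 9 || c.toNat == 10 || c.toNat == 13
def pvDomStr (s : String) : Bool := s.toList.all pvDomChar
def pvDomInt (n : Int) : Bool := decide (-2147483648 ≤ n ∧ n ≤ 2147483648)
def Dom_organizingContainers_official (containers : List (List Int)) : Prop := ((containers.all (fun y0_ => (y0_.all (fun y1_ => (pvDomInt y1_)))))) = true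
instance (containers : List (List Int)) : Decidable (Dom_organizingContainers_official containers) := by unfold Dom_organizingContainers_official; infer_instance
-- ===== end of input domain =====

-- B replaces A's column-major extraction plus two sorts and a list comparison by one
-- row-major pass accumulating the column sums and a signed dict tally deciding multiset
-- equality (alternative decomposition; same quadratic cost).

-- ===== PORT A =====
def organizingContainers_official (containers : List (List Int)) : String :=
  let containers_count := containers.map (fun c => c.sum)
  let types_count := (PySem.List.pyRange 0 (PySem.List.len containers) 1).foldl
    (fun acc i =>
      acc ++ [(PySem.List.pyRange 0 (PySem.List.len containers) 1).foldl
        (fun c j => c + PySem.List.pyGetD (PySem.List.pyGetD containers j []) i 0) 0]) []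
  let cc := PySem.List.sorted containers_count (fun x => x) false
  let tc := PySem.List.sorted types_count (fun x => x) false
  if cc == tc then "Possible" else "Impossible"

-- ===== PORT B =====
def organizingContainers_official_alt (containers : List (List Int)) : String :=
  let n : Int := PySem.List.len containers
  -- col[i] += row[i] : indices are in range under Pre_, pySetD/pyGetD are exact there
  let col := containers.foldl
    (fun col row => (PySem.List.pyRange 0 n 1).foldl
      (fun c i => PySem.List.pySetD c i (PySem.List.pyGetD c i 0 + PySem.List.pyGetD row i 0)) col)
    (List.replicate containers.length 0)
  let tally := containers.foldl (fun d row => d.insert row.sum (d.getD row.sum 0 + 1))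
    (PySem.Dict.empty : PySem.Dict Int Int)
  let tally2 := col.foldl (fun d c => d.insert c (d.getD c 0 - 1)) tally
  if tally2.values.all (fun v => v == 0) then "Possible" else "Impossible"

-- ===== PRECONDITION & SPEC =====
-- Pre_ excludes exactly the inputs on which A raises IndexError: some row shorter than
-- the number of containers (containers[j][i] with i up to len(containers)).
def Pre_organizingContainers_official (containers : List (List Int)) : Prop :=
  ∀ row ∈ containers, containers.length ≤ row.length
instance (containers : List (List Int)) : Decidable (Pre_organizingContainers_official containers) := by unfold Pre_organizingContainers_official; infer_instance

def pvWitness_organizingContainers_official : List (List Int) := [[1, 2], [2, 1]]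

def Spec_organizingContainers_official (containers : List (List Int)) (out : String) : Prop := out = organizingContainers_official_alt containers
instance (containers : List (List Int)) (out : String) : Decidable (Spec_organizingContainers_official containers out) := by unfold Spec_organizingContainers_official; infer_instance

-- ===== CLAIM (what is proved, stated in full; the proofs are below) =====
def Claim_equal_organizingContainers_official : Prop := ∀ (containers : List (List Int)), Dom_organizingContainers_official containers → Pre_organizingContainers_official containers → Spec_organizingContainers_official containers (organizingContainers_official containers)

-- ===== LEMMAS AND PROOFS =====

-- a list is the table of its own entries
lemma pv_list_eq_map_range_getD (l : List Int) :
    l = (List.range l.length).map (fun i => l.getD i 0) := by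
  apply List.ext_getElem (by simp)
  intro i h1 h2
  simp [List.getD_eq_getElem?_getD, h1]

-- the inner 'col[i] += row[i]' loop, run up to k ≤ len(col)
lemma pv_setRange (row col : List Int) (k : Nat) (hk : k ≤ col.length) :
    (List.range k).foldl (fun c i => c.set i (c.getD i 0 + row.getD i 0)) col
    = ((List.range k).map (fun i => col.getD i 0 + row.getD i 0)) ++ col.drop k := by
  induction k with
  | zero => simp
  | succ k ih =>
    have hk' : k ≤ col.length := Nat.le_of_succ_le hk
    have hklt : k < col.length := hk
    rw [List.range_succ, List.foldl_append, ih hk', List.map_append]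
    have hdrop : col.drop k = col[k] :: col.drop (k + 1) := List.drop_eq_getElem_cons hklt
    have hlen : ((List.range k).map (fun i => col.getD i 0 + row.getD i 0)).length = k := by simp
    rw [hdrop]
    simp only [List.foldl_cons, List.foldl_nil, List.map_cons, List.map_nil]
    have hget : ((List.range k).map (fun i => col.getD i 0 + row.getD i 0) ++ col[k] :: col.drop (k + 1)).getD k 0 = col[k] := by
      rw [List.getD_append_right _ _ _ _ (by omega), hlen, Nat.sub_self]; rfl
    have hset : ∀ v : Int, ((List.range k).map (fun i => col.getD i 0 + row.getD i 0) ++ col[k] :: col.drop (k + 1)).set k v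
        = (List.range k).map (fun i => col.getD i 0 + row.getD i 0) ++ v :: col.drop (k + 1) := by
      intro v
      rw [List.set_append_right _ _ (by omega), hlen, Nat.sub_self]; rfl
    rw [hget, hset]
    have hgk : col[k] = col.getD k 0 := by
      simp [List.getD_eq_getElem?_getD, hklt]
    rw [hgk]
    simp

-- one row folded into the column accumulator
lemma pv_inner (row col : List Int) (N : Nat) (h : col.length = N) :
    (PySem.List.pyRange 0 (N : Int) 1).foldl
      (fun c i => PySem.List.pySetD c i (PySem.List.pyGetD c i 0 + PySem.List.pyGetD row i 0)) col
    = (List.range N).map (fun i => col.getD i 0 + row.getD i 0) := by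
  subst h
  rw [PySem.List.pyRange_zero_nat, List.foldl_map]
  simp only [PySem.List.pySetD_natCast, PySem.List.pyGetD_natCast]
  rw [pv_setRange row col col.length (Nat.le_refl _), List.drop_length, List.append_nil]

-- the whole row-major accumulation
lemma pv_outer (rows : List (List Int)) (N : Nat) (col : List Int) (h : col.length = N) :
    rows.foldl
      (fun col row => (PySem.List.pyRange 0 (N : Int) 1).foldl
        (fun c i => PySem.List.pySetD c i (PySem.List.pyGetD c i 0 + PySem.List.pyGetD row i 0)) col) col
    = (List.range N).map (fun i => col.getD i 0 + (rows.map (fun row => row.getD i 0)).sum) := by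
  induction rows generalizing col with
  | nil =>
    simp only [List.foldl_nil, List.map_nil, List.sum_nil, add_zero]
    rw [← h]; exact pv_list_eq_map_range_getD col
  | cons r rs ih =>
    rw [List.foldl_cons, pv_inner r col N h,
        ih _ (by simp)]
    apply List.map_congr_left
    intro i hi
    have hiN : i < N := List.mem_range.mp hi
    rw [List.getD_eq_getElem?_getD, List.getElem?_map,
        List.getElem?_range hiN]
    simp [add_assoc]

-- the signed decrement loop reads off a count
lemma pv_getD_foldl_insert_sub_one (l : List Int) (d : PySem.Dict Int Int) (v : Int) :
    (l.foldl (fun d x => d.insert x (d.getD x 0 - 1)) d).getD v 0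
    = d.getD v 0 - (l.count v : Int) := by
  induction l generalizing d with
  | nil => simp
  | cons x xs ih =>
    rw [List.foldl_cons, ih, PySem.Dict.getD_insert, List.count_cons]
    by_cases hvx : v = x <;> simp [hvx] <;> omega

-- counts of the two canonical lists agree iff the tally balance is all zero
lemma pv_balance_iff (L C : List Int) :
    ((C.foldl (fun d c => d.insert c (d.getD c 0 - 1))
        (L.foldl (fun d s => d.insert s (d.getD s 0 + 1))
          (PySem.Dict.empty : PySem.Dict Int Int))).values.all (fun v => v == 0)) = true
    ↔ ∀ a : Int, L.count a = C.count a := by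
  set d1 := L.foldl (fun d s => d.insert s (d.getD s 0 + 1)) (PySem.Dict.empty : PySem.Dict Int Int) with hd1
  set d2 := C.foldl (fun d c => d.insert c (d.getD c 0 - 1)) d1 with hd2
  have hgd1 : ∀ v, d1.getD v 0 = (L.count v : Int) := by
    intro v; rw [hd1, PySem.Dict.getD_foldl_insert_add_one]; simp
  have hgd2 : ∀ v, d2.getD v 0 = (L.count v : Int) - (C.count v : Int) := by
    intro v; rw [hd2, pv_getD_foldl_insert_sub_one, hgd1]
  have hnd1 : d1.keys.Nodup := by
    rw [hd1]; exact PySem.Dict.nodup_keys_foldl_insert _ _ _ (by simp)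
  have hnd2 : d2.keys.Nodup := by
    rw [hd2]; exact PySem.Dict.nodup_keys_foldl_insert _ _ _ hnd1
  have hk1 : d1.keys = PySem.Set.ofList L := by
    rw [hd1, PySem.Dict.keys_foldl_insert]
    simp [PySem.Set.update_nil_left]
  have hk2 : ∀ y : Int, y ∈ d2.keys ↔ y ∈ L ∨ y ∈ C := by
    intro y
    rw [hd2, PySem.Dict.keys_foldl_insert, PySem.Set.mem_update, hk1, PySem.Set.mem_ofList]
  rw [PySem.Dict.values_eq_map_keys d2 hnd2 0, List.all_map, List.all_eq_true]
  constructor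
  · intro h a
    by_cases ha : a ∈ d2.keys
    · have := h a ha
      simp only [Function.comp, beq_iff_eq] at this
      rw [hgd2] at this; omega
    · have haL : a ∉ L := fun hm => ha ((hk2 a).mpr (Or.inl hm))
      have haC : a ∉ C := fun hm => ha ((hk2 a).mpr (Or.inr hm))
      rw [List.count_eq_zero_of_not_mem haL, List.count_eq_zero_of_not_mem haC]
  · intro h a _
    simp only [Function.comp, beq_iff_eq]
    rw [hgd2, h a]; ring

-- A's column-major types_count equals the canonical column-sum table
lemma pv_typesA (containers : List (List Int)) :
    (PySem.List.pyRange 0 (PySem.List.len containers) 1).foldl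
      (fun acc i =>
        acc ++ [(PySem.List.pyRange 0 (PySem.List.len containers) 1).foldl
          (fun c j => c + PySem.List.pyGetD (PySem.List.pyGetD containers j []) i 0) 0]) []
    = (List.range containers.length).map
        (fun i => (containers.map (fun row => row.getD i 0)).sum) := by
  rw [PySem.List.foldl_append_singleton_eq_map, List.nil_append]
  have hlen : PySem.List.len containers = (containers.length : Int) := by
    simp [PySem.List.len_eq]
  rw [hlen, PySem.List.pyRange_zero_nat, List.map_map]
  apply List.map_congr_left
  intro k _
  simp only [Function.comp]
  rw [← PySem.List.pyRange_zero_nat, ← hlen,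
      PySem.List.foldl_pyRange_zero_pyGetD containers ([] : List Int)
        (fun c row => c + PySem.List.pyGetD row (k : Int) 0) 0,
      PySem.List.foldl_add]
  simp

-- ===== VERDICT (by name: the statement is the Claim_ definition above) =====
theorem organizingContainers_official_spec : Claim_equal_organizingContainers_official := by
  intro containers _ _
  unfold Spec_organizingContainers_official
  unfold organizingContainers_official organizingContainers_official_alt
  simp only []
  set N := containers.length with hN
  set L := containers.map (fun c => c.sum) with hL
  set C := (List.range N).map (fun i => (containers.map (fun row => row.getD i 0)).sum) with hC
  have hT : (PySem.List.pyRange 0 (PySem.List.len containers) 1).foldl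
      (fun acc i =>
        acc ++ [(PySem.List.pyRange 0 (PySem.List.len containers) 1).foldl
          (fun c j => c + PySem.List.pyGetD (PySem.List.pyGetD containers j []) i 0) 0]) [] = C :=
    pv_typesA containers
  have hlen : PySem.List.len containers = (N : Int) := by simp [PySem.List.len_eq, hN]
  have hcol : containers.foldl
      (fun col row => (PySem.List.pyRange 0 (PySem.List.len containers) 1).foldl
        (fun c i => PySem.List.pySetD c i (PySem.List.pyGetD c i 0 + PySem.List.pyGetD row i 0)) col)
      (List.replicate containers.length 0) = C := by
    rw [hlen, pv_outer containers N (List.replicate N 0) (by simp)]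
    apply List.map_congr_left
    intro i hi
    rw [List.getD_replicate _ (List.mem_range.mp hi), zero_add]
  have htallyL : containers.foldl (fun d row => d.insert row.sum (d.getD row.sum 0 + 1))
      (PySem.Dict.empty : PySem.Dict Int Int)
      = L.foldl (fun d s => d.insert s (d.getD s 0 + 1)) PySem.Dict.empty := by
    rw [hL, List.foldl_map]
  rw [hT, hcol, htallyL]
  have hiff : ((PySem.List.sorted L (fun x => x) false == PySem.List.sorted C (fun x => x) false) = true)
      ↔ ((C.foldl (fun d c => d.insert c (d.getD c 0 - 1))
            (L.foldl (fun d s => d.insert s (d.getD s 0 + 1))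
              (PySem.Dict.empty : PySem.Dict Int Int))).values.all (fun v => v == 0)) = true := by
    rw [beq_iff_eq, PySem.List.sorted_id_eq_sorted_id_iff_perm, List.perm_iff_count,
        pv_balance_iff]
  by_cases hp : (PySem.List.sorted L (fun x => x) false == PySem.List.sorted C (fun x => x) false) = true
  · rw [if_pos hp, if_pos (hiff.mp hp)]
  · rw [if_neg hp, if_neg (fun hq => hp (hiff.mpr hq))]
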